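-- pv_equiv track=rewrite | github.com/Jaeyoung0425/jaeyoung | Python_Practice/Jalynne_Exercise/jalynne_exercise_tools.py | synonym_clear
-- ===== SOURCE A (Python) =====
-- def synonym_clear(list_, synonym_dic):
--     result_list = []
--     for r in list_:
--         flag = 0
--         for key in list(synonym_dic.keys()):
--             synonym_list = synonym_dic[key]
--             for synonym in synonym_list:
--                 if synonym in r:
--                     result_list.append(key)
--                     flag = 1
--                     break
--             if flag == 1:
--                 break
--         if flag == 1:
--             pass
--         else:
--             result_list.append('no result')
--     return result_list
-- ===== SOURCE B (Python) =====
-- def synonym_clear(list_, synonym_dic):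
--     # Key-major worklist pass: keep the indices still unresolved in `pending`;
--     # for each key in priority order assign it to every pending record it
--     # matches (first write wins) and shrink the worklist, stopping early once
--     # every record is resolved.
--     best = ['no result'] * len(list_)
--     pending = list(range(len(list_)))
--     for key in synonym_dic:
--         if not pending:
--             break
--         syns = synonym_dic[key]
--         still = []
--         for i in pending:
--             if any(s in list_[i] for s in syns):
--                 best[i] = key
--             else:
--                 still.append(i)
--         pending = still
--     return best
-- ===== Notes on version B (the rewrite author's own statement) =====
-- stated objective: faster
-- what changed: Inverts the loop nesting: instead of A's record-major scan that rebuilds list(synonym_dic.keys()) and re-looks up each key's synonym list for every record, B makes one key-major pass per key over a shrinking worklist of unresolved record indices, assigning first-write-wins into a preallocated result array and breaking once all records are resolved.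
import Mathlib
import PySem

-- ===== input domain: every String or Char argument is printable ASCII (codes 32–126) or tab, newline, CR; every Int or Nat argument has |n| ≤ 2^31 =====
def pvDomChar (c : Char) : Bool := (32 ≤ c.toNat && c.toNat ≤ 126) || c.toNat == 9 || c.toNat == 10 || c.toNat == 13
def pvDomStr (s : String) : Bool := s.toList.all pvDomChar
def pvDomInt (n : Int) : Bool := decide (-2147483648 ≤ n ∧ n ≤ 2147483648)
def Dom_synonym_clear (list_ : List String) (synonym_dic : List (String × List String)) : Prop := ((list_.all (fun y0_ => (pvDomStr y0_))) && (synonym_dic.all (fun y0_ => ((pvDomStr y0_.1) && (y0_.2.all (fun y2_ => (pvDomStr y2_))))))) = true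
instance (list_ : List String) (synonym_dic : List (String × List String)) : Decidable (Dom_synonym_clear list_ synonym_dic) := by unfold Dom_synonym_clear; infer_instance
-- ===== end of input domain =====

-- B inverts the loop nesting: a key-major pass over a shrinking worklist of unresolved
-- record indices (first write wins, early break) replaces A's record-major flag/break scan.

-- ===== PORT A =====
-- inner 'for synonym in synonym_list: if synonym in r: …; break'
def synAnyMatch (r : String) : List String → Bool
  | [] => false
  | s :: t => if PySem.Str.isIn s r then true else synAnyMatch r t

-- the elements A appends for one r: the key loop with its flag/break, 'no result' when it falls through
def synRowA (d : PySem.Dict String (List String)) (r : String) : List String → List String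
  | [] => ["no result"]
  | k :: rest => if synAnyMatch r (d.getD k []) then [k] else synRowA d r rest

def synonym_clear (list_ : List String) (synonym_dic : List (String × List String)) : List String :=
  let d := PySem.Dict.ofList synonym_dic
  list_.foldl (fun result_list r => result_list ++ synRowA d r d.keys) []

-- ===== PORT B =====
-- 'for key in synonym_dic: if not pending: break; … one pass over pending'
-- (the in-place 'best[i] = key' is rendered as List.set; list_[i] as getD, i is always in range)
def bLoop (d : PySem.Dict String (List String)) (list_ : List String) :
    List String → List String → List Nat → List String
  | [], best, _ => best
  | key :: rest, best, pending =>
    if pending = [] then best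
    else
      let syns := d.getD key []
      let step := pending.foldl
        (fun (acc : List String × List Nat) i =>
          if syns.any (fun s => PySem.Str.isIn s (list_.getD i "")) then
            (acc.1.set i key, acc.2)
          else
            (acc.1, acc.2 ++ [i]))
        (best, [])
      bLoop d list_ rest step.1 step.2

def synonym_clear_alt (list_ : List String) (synonym_dic : List (String × List String)) : List String :=
  let d := PySem.Dict.ofList synonym_dic
  bLoop d list_ d.keys (list_.map (fun _ => "no result")) (List.range list_.length)

-- ===== PRECONDITION & SPEC =====
def Spec_synonym_clear (list_ : List String) (synonym_dic : List (String × List String)) (out : List String) : Prop := out = synonym_clear_alt list_ synonym_dic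
instance (list_ : List String) (synonym_dic : List (String × List String)) (out : List String) : Decidable (Spec_synonym_clear list_ synonym_dic out) := by unfold Spec_synonym_clear; infer_instance

-- ===== CLAIM (what is proved, stated in full; the proofs are below) =====
def Claim_equal_synonym_clear : Prop := ∀ (list_ : List String) (synonym_dic : List (String × List String)), Dom_synonym_clear list_ synonym_dic → Spec_synonym_clear list_ synonym_dic (synonym_clear list_ synonym_dic)

-- ===== LEMMAS AND PROOFS =====

-- the first matching key for record r under key order K (head of synRowA)
def synFirstKey (d : PySem.Dict String (List String)) (r : String) : List String → String
  | [] => "no result"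
  | k :: rest => if synAnyMatch r (d.getD k []) then k else synFirstKey d r rest

-- optional variant used to describe B's worklist fold
def synFirstKey? (d : PySem.Dict String (List String)) (r : String) : List String → Option String
  | [] => none
  | k :: rest =>
    if (d.getD k []).any (fun s => PySem.Str.isIn s r) then some k else synFirstKey? d r rest

theorem synRowA_eq_first (d : PySem.Dict String (List String)) (r : String) (K : List String) :
    synRowA d r K = [synFirstKey d r K] := by
  induction K with
  | nil => rfl
  | cons k rest ih => simp only [synRowA, synFirstKey]; split_ifs <;> simp [ih]

theorem synAnyMatch_eq_any (r : String) (l : List String) :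
    synAnyMatch r l = l.any (fun s => PySem.Str.isIn s r) := by
  induction l with
  | nil => rfl
  | cons s t ih =>
    cases h : PySem.Str.isIn s r <;>
      simp only [synAnyMatch, List.any_cons, h, Bool.false_eq_true, if_true, if_false,
        Bool.true_or, Bool.false_or, ih]

theorem synFirstKey_eq_getD (d : PySem.Dict String (List String)) (r : String) (K : List String) :
    synFirstKey d r K = (synFirstKey? d r K).getD "no result" := by
  induction K with
  | nil => rfl
  | cons k rest ih =>
    simp only [synFirstKey, synFirstKey?, synAnyMatch_eq_any]
    split_ifs <;> simp [ih]

-- inner pass: the pair fold splits into a set-fold over the matched indices and the filtered worklist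
theorem inner_fold_split (m : Nat → Bool) (key : String) :
    ∀ (P : List Nat) (b0 : List String) (st0 : List Nat),
      P.foldl
        (fun (acc : List String × List Nat) i =>
          if m i then (acc.1.set i key, acc.2) else (acc.1, acc.2 ++ [i]))
        (b0, st0)
      = ((P.filter m).foldl (fun b i => b.set i key) b0, st0 ++ P.filter (fun i => !m i)) := by
  intro P
  induction P with
  | nil => intro b0 st0; simp
  | cons i t ih =>
    intro b0 st0
    cases h : m i <;> simp [List.foldl_cons, h, ih]

theorem setfold_length (key : String) (L : List Nat) :
    ∀ (b0 : List String), (L.foldl (fun b i => b.set i key) b0).length = b0.length := by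
  induction L with
  | nil => intro b0; rfl
  | cons i t ih => intro b0; simp [List.foldl_cons, ih]

theorem setfold_getD (key : String) (L : List Nat) :
    ∀ (b0 : List String) (j : Nat), j < b0.length →
      (L.foldl (fun b i => b.set i key) b0).getD j "" =
        if j ∈ L then key else b0.getD j "" := by
  induction L with
  | nil => intro b0 j _; simp
  | cons i t ih =>
    intro b0 j hj
    rw [List.foldl_cons, ih (b0.set i key) j (by simpa using hj)]
    by_cases hjt : j ∈ t
    · simp [hjt]
    · by_cases hji : j = i
      · subst hji
        simp [hjt, List.getD_eq_getElem?_getD, hj]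
      · simp [hjt, hji, List.getD_eq_getElem?_getD, List.getElem?_set_ne (fun h => hji h.symm)]

theorem bLoop_length (d : PySem.Dict String (List String)) (list_ : List String) :
    ∀ (K : List String) (best : List String) (pending : List Nat),
      (bLoop d list_ K best pending).length = best.length := by
  intro K
  induction K with
  | nil => intro best pending; rfl
  | cons key rest ih =>
    intro best pending
    by_cases hp : pending = []
    · simp [bLoop, hp]
    · simp only [bLoop, if_neg hp, inner_fold_split]
      rw [ih, setfold_length]

theorem bLoop_getD (d : PySem.Dict String (List String)) (list_ : List String) :
    ∀ (K : List String) (best : List String) (pending : List Nat),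
      (∀ i ∈ pending, i < best.length) →
      ∀ j, j < best.length →
        (bLoop d list_ K best pending).getD j "" =
          if j ∈ pending then
            (synFirstKey? d (list_.getD j "") K).getD (best.getD j "")
          else best.getD j "" := by
  intro K
  induction K with
  | nil =>
    intro best pending _ j _
    simp only [bLoop, synFirstKey?]
    split_ifs <;> rfl
  | cons key rest ih =>
    intro best pending hlt j hj
    by_cases hp : pending = []
    · subst hp
      simp [bLoop]
    · simp only [bLoop, if_neg hp, inner_fold_split]
      set m : Nat → Bool :=
        fun i => (d.getD key []).any (fun s => PySem.Str.isIn s (list_.getD i "")) with hm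
      set best1 := (pending.filter m).foldl (fun b i => b.set i key) best with hb1
      have hlen1 : best1.length = best.length := setfold_length _ _ _
      have hlt1 : ∀ i ∈ ([] : List Nat) ++ pending.filter (fun i => !m i), i < best1.length := by
        intro i hi
        rw [hlen1]
        rw [List.nil_append] at hi
        exact hlt i (List.mem_filter.mp hi).1
      rw [ih best1 _ hlt1 j (by rw [hlen1]; exact hj)]
      have hgd1 : best1.getD j "" = if j ∈ pending.filter m then key else best.getD j "" :=
        setfold_getD _ _ _ _ hj
      by_cases hjp : j ∈ pending
      · by_cases hmj : m j = true
        · have hjf : j ∈ pending.filter m := List.mem_filter.mpr ⟨hjp, hmj⟩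
          have hjf' : j ∉ pending.filter (fun i => !m i) := by
            intro h; have := (List.mem_filter.mp h).2; simp [hmj] at this
          simp only [List.nil_append, if_neg hjf', hgd1, if_pos hjf, if_pos hjp, synFirstKey?]
          rw [if_pos hmj]
          rfl
        · have hjf : j ∉ pending.filter m := by
            intro h; exact hmj (List.mem_filter.mp h).2
          have hjf' : j ∈ pending.filter (fun i => !m i) :=
            List.mem_filter.mpr ⟨hjp, by simp [hmj]⟩
          simp only [List.nil_append, if_pos hjf', hgd1, if_neg hjf, if_pos hjp, synFirstKey?]
          rw [if_neg hmj]
      · have hjf : j ∉ pending.filter m := fun h => hjp (List.mem_filter.mp h).1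
        have hjf' : j ∉ pending.filter (fun i => !m i) := fun h => hjp (List.mem_filter.mp h).1
        simp only [List.nil_append, if_neg hjf', hgd1, if_neg hjf, if_neg hjp]

theorem flatMap_single {α β : Type} (f : α → β) (l : List α) :
    l.flatMap (fun x => [f x]) = l.map f := by
  induction l <;> simp_all

-- ===== VERDICT (by name: the statement is the Claim_ definition above) =====
theorem synonym_clear_spec : Claim_equal_synonym_clear := by
  intro list_ synonym_dic _
  unfold Spec_synonym_clear synonym_clear synonym_clear_alt
  set d := PySem.Dict.ofList synonym_dic with hd
  have hA : list_.foldl (fun result_list r => result_list ++ synRowA d r d.keys) [] =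
      list_.map (fun r => synFirstKey d r d.keys) := by
    rw [PySem.List.foldl_append_eq_flatMap]
    simp only [List.nil_append, synRowA_eq_first, flatMap_single]
  rw [hA]
  have hlen : (bLoop d list_ d.keys (list_.map (fun _ => "no result"))
      (List.range list_.length)).length = list_.length := by
    rw [bLoop_length]; simp
  apply List.ext_getElem (by rw [List.length_map, hlen])
  intro j h1 h2
  have hjl : j < list_.length := by simpa using h1
  have hj : j < (list_.map (fun _ : String => "no result")).length := by simpa using hjl
  have hB := bLoop_getD d list_ d.keys (list_.map (fun _ => "no result"))
      (List.range list_.length) (by intro i hi; simpa using List.mem_range.mp hi) j hj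
  rw [if_pos (List.mem_range.mpr hjl)] at hB
  rw [List.getD_eq_getElem _ _ h2] at hB
  rw [List.getD_eq_getElem _ _ hjl] at hB
  rw [List.getD_eq_getElem _ _ hj] at hB
  simp only [List.getElem_map] at hB
  rw [List.getElem_map, hB, synFirstKey_eq_getD]
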